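-- pv_equiv track=rewrite | github.com/j-s-ashley/tc-summary-plotting | TC.py | format_tests
-- ===== SOURCE A (Python) =====
-- def format_tests(all_tests):
--     '''
--     Given all tests conducted during thermal cycling, reformat them into a list
--     of list, where each sublist contains an IV, Pedestal Trim, Strobe Delay, 3-Point
--     Gain, 10-Point Gain, Noise Occupancy, Open Channel Search, and HV-Stability test
--     for a test section. Where a section does not contain a particular test type, keep
--     that test in the list as an empty string.
--
--     Arguments:
--     all_tests - Type = list of list of string. Each sublist corresponds to the names
--                 of all tests run in a single testing section.
--
--     Returns:
--     formatted_tests - Type = list of list of string. Each sublist corresponds to the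
--                       names of all tests run in a single testing section, with empty
--                       strings where there are no tests of a type.
--     '''
--
--     formatted_tests = [] #initialize
--
--     for test_list in all_tests: #iterate through the sections
--
--         IV   = "" #initialize
--         PT   = ""
--         SD   = ""
--         RC3  = ""
--         RC10 = ""
--         NO   = ""
--         OCS  = ""
--         HVS  = ""
--         is_10PG = False #first RC will be a 3PG, second a 10PG
--
--         for test in test_list: #iterate through tests associated with a single section
--             #Label the test by test type
--
--             if "IV" in test:
--                 IV = test
--             elif "PEDESTAL_TRIM" in test:
--                 PT = test
--             elif "STROBE_DELAY" in test:
--                 SD = test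
--             elif "RESPONSE_CURVE" in test and not is_10PG:
--                 RC3 = test
--                 is_10PG = True #next RC will be a 10PG
--             elif "RESPONSE_CURVE" in test and is_10PG:
--                 RC10 = test
--             elif "_NO" in test:
--                 NO = test
--             elif "OPEN_CHANNEL_SEARCH" in test:
--                 OCS = test
--             elif "HVSTABILITY" in test:
--                 HVS = test
--
--         formatted_list = [IV, PT, SD, RC3, RC10, NO, OCS, HVS] #all test types
--         formatted_tests.append(formatted_list) #append all test types
--
--     return formatted_tests
-- ===== SOURCE B (Python) =====
-- _RULES = [
--     ("IV", "IV"),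
--     ("PEDESTAL_TRIM", "PT"),
--     ("STROBE_DELAY", "SD"),
--     ("RESPONSE_CURVE", "RC"),
--     ("_NO", "NO"),
--     ("OPEN_CHANNEL_SEARCH", "OCS"),
--     ("HVSTABILITY", "HVS"),
-- ]
--
-- def _category(test):
--     for sub, key in _RULES:
--         if sub in test:
--             return key
--     return None
--
-- def _last_of(tests, key):
--     return next((t for t in reversed(tests) if _category(t) == key), "")
--
-- def _row(tests):
--     rcs = [t for t in tests if _category(t) == "RC"]
--     return [
--         _last_of(tests, "IV"),
--         _last_of(tests, "PT"),
--         _last_of(tests, "SD"),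
--         rcs[0] if rcs else "",
--         rcs[-1] if len(rcs) > 1 else "",
--         _last_of(tests, "NO"),
--         _last_of(tests, "OCS"),
--         _last_of(tests, "HVS"),
--     ]
--
-- def format_tests(all_tests):
--     return [_row(tests) for tests in all_tests]
-- ===== Notes on version B (the rewrite author's own statement) =====
-- stated objective: simpler
-- what changed: Replaced A's nine mutable state variables threaded through the inner loop with a stateless decomposition: a single first-match rule table classifies each test, each fixed slot is the last test of its category, and the two gain slots are read off the list of response-curve tests.
import Mathlib
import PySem

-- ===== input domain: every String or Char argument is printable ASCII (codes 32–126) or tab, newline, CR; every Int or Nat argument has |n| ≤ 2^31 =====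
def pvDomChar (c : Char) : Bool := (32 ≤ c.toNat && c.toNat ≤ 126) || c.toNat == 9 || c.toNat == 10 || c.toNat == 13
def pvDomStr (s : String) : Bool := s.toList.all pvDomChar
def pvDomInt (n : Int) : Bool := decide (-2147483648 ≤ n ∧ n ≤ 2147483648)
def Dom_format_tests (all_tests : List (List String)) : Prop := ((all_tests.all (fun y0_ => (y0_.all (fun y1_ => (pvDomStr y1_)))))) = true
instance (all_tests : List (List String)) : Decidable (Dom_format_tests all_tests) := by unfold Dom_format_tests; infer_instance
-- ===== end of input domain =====

-- B replaces A's nine-variable running state with stateless per-slot searches: each slot is the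
-- last test matching its rule and the two gain slots come from the list of response-curve tests
-- (objective: simpler decomposition; same asymptotic cost).

-- ===== PORT A =====
def pvStateA := String × String × String × String × String × String × String × String × Bool

def pvStepA (s : pvStateA) (test : String) : pvStateA :=
  match s with
  | (iv, pt, sd, rc3, rc10, no, ocs, hvs, b) =>
    if PySem.Str.isIn "IV" test then (test, pt, sd, rc3, rc10, no, ocs, hvs, b)
    else if PySem.Str.isIn "PEDESTAL_TRIM" test then (iv, test, sd, rc3, rc10, no, ocs, hvs, b)
    else if PySem.Str.isIn "STROBE_DELAY" test then (iv, pt, test, rc3, rc10, no, ocs, hvs, b)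
    else if PySem.Str.isIn "RESPONSE_CURVE" test && !b then (iv, pt, sd, test, rc10, no, ocs, hvs, true)
    else if PySem.Str.isIn "RESPONSE_CURVE" test && b then (iv, pt, sd, rc3, test, no, ocs, hvs, b)
    else if PySem.Str.isIn "_NO" test then (iv, pt, sd, rc3, rc10, test, ocs, hvs, b)
    else if PySem.Str.isIn "OPEN_CHANNEL_SEARCH" test then (iv, pt, sd, rc3, rc10, no, test, hvs, b)
    else if PySem.Str.isIn "HVSTABILITY" test then (iv, pt, sd, rc3, rc10, no, ocs, test, b)
    else (iv, pt, sd, rc3, rc10, no, ocs, hvs, b)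

def format_tests (all_tests : List (List String)) : List (List String) :=
  all_tests.foldl (fun formatted_tests test_list =>
    formatted_tests ++
      [(match test_list.foldl pvStepA ("", "", "", "", "", "", "", "", false) with
        | (iv, pt, sd, rc3, rc10, no, ocs, hvs, _) => [iv, pt, sd, rc3, rc10, no, ocs, hvs])]) []

-- ===== PORT B =====
def pvRules : List (String × String) :=
  [("IV", "IV"), ("PEDESTAL_TRIM", "PT"), ("STROBE_DELAY", "SD"), ("RESPONSE_CURVE", "RC"),
   ("_NO", "NO"), ("OPEN_CHANNEL_SEARCH", "OCS"), ("HVSTABILITY", "HVS")]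

def pvCatGo : List (String × String) → String → Option String
  | [], _ => none
  | (sub, key) :: rs, t => if PySem.Str.isIn sub t then some key else pvCatGo rs t

def pvCategory (t : String) : Option String := pvCatGo pvRules t

def pvLastOf (tests : List String) (key : String) : String :=
  (tests.reverse.find? (fun t => pvCategory t == some key)).getD ""

def pvRow (tests : List String) : List String :=
  let rcs := tests.filter (fun t => pvCategory t == some "RC")
  [pvLastOf tests "IV", pvLastOf tests "PT", pvLastOf tests "SD",
   (match rcs with | [] => "" | x :: _ => x),
   (if rcs.length > 1 then rcs.getLastD "" else ""),
   pvLastOf tests "NO", pvLastOf tests "OCS", pvLastOf tests "HVS"]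

def format_tests_alt (all_tests : List (List String)) : List (List String) :=
  all_tests.map pvRow

-- ===== PRECONDITION & SPEC =====
def Spec_format_tests (all_tests : List (List String)) (out : List (List String)) : Prop := out = format_tests_alt all_tests
instance (all_tests : List (List String)) (out : List (List String)) : Decidable (Spec_format_tests all_tests out) := by unfold Spec_format_tests; infer_instance

-- ===== CLAIM (what is proved, stated in full; the proofs are below) =====
def Claim_equal_format_tests : Prop := ∀ (all_tests : List (List String)), Dom_format_tests all_tests → Spec_format_tests all_tests (format_tests all_tests)

-- ===== LEMMAS AND PROOFS =====

def pvIsCat (k : String) (t : String) : Bool := pvCategory t == some k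

def pvRc3 (rcs : List String) : String := match rcs with | [] => "" | x :: _ => x

def pvRc10 (rcs : List String) : String := if rcs.length > 1 then rcs.getLastD "" else ""

def pvUpd (l : List String) (p : String → Bool) (x : String) : String :=
  (l.reverse.find? p).getD x

lemma pvIsCat_def (k : String) : pvIsCat k = fun t => pvCategory t == some k := rfl

lemma pvUpd_cons (p : String → Bool) (a : String) (l : List String) (x : String) :
    pvUpd (a :: l) p x = pvUpd l p (if p a then a else x) := by
  unfold pvUpd
  rw [List.reverse_cons, List.find?_append]
  cases h : l.reverse.find? p with
  | some y => simp
  | none => by_cases hp : p a <;> simp [List.find?, hp]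

lemma pvMain (l : List String) : ∀ (iv pt sd no ocs hvs : String) (rcs : List String),
    l.foldl pvStepA (iv, pt, sd, pvRc3 rcs, pvRc10 rcs, no, ocs, hvs, !rcs.isEmpty)
    = (pvUpd l (pvIsCat "IV") iv, pvUpd l (pvIsCat "PT") pt, pvUpd l (pvIsCat "SD") sd,
       pvRc3 (rcs ++ l.filter (pvIsCat "RC")), pvRc10 (rcs ++ l.filter (pvIsCat "RC")),
       pvUpd l (pvIsCat "NO") no, pvUpd l (pvIsCat "OCS") ocs, pvUpd l (pvIsCat "HVS") hvs,
       !(rcs ++ l.filter (pvIsCat "RC")).isEmpty) := by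
  induction l with
  | nil => intro iv pt sd no ocs hvs rcs; simp [pvUpd]
  | cons a l ih =>
    intro iv pt sd no ocs hvs rcs
    by_cases h1 : PySem.Str.isIn "IV" a = true
    · have hc : pvCategory a = some "IV" := by
        simp only [pvCategory, pvRules, pvCatGo]; rw [if_pos h1]
      simp only [List.foldl_cons, pvStepA, Bool.false_eq_true, if_false, h1, if_true, Bool.false_and]
      rw [ih a pt sd no ocs hvs rcs]
      simp [pvUpd_cons, pvIsCat, hc]
    by_cases h2 : PySem.Str.isIn "PEDESTAL_TRIM" a = true
    · have hc : pvCategory a = some "PT" := by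
        simp only [pvCategory, pvRules, pvCatGo]; rw [if_neg h1, if_pos h2]
      simp only [List.foldl_cons, pvStepA, Bool.false_eq_true, if_false, h1, h2, if_true, Bool.false_and]
      rw [ih iv a sd no ocs hvs rcs]
      simp [pvUpd_cons, pvIsCat, hc]
    by_cases h3 : PySem.Str.isIn "STROBE_DELAY" a = true
    · have hc : pvCategory a = some "SD" := by
        simp only [pvCategory, pvRules, pvCatGo]; rw [if_neg h1, if_neg h2, if_pos h3]
      simp only [List.foldl_cons, pvStepA, Bool.false_eq_true, if_false, h1, h2, h3, if_true, Bool.false_and]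
      rw [ih iv pt a no ocs hvs rcs]
      simp [pvUpd_cons, pvIsCat, hc]
    by_cases h4 : PySem.Str.isIn "RESPONSE_CURVE" a = true
    · have hc : pvCategory a = some "RC" := by
        simp only [pvCategory, pvRules, pvCatGo]; rw [if_neg h1, if_neg h2, if_neg h3, if_pos h4]
      cases rcs with
      | nil =>
        simp only [List.foldl_cons, pvStepA, Bool.false_eq_true, if_false, h1, h2, h3, h4, if_true,
          List.isEmpty_nil, Bool.not_false, Bool.and_true, Bool.and_false, Bool.not_true]
        have hseed : (iv, pt, sd, a, pvRc10 ([] : List String), no, ocs, hvs, true)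
            = (iv, pt, sd, pvRc3 [a], pvRc10 [a], no, ocs, hvs, !([a].isEmpty)) := by
          simp [pvRc3, pvRc10]
        rw [hseed, ih iv pt sd no ocs hvs [a]]
        simp [pvUpd_cons, pvIsCat, hc]
      | cons x rs =>
        simp only [List.foldl_cons, pvStepA, Bool.false_eq_true, if_false, h1, h2, h3, h4, if_true,
          List.isEmpty_cons, Bool.not_false, Bool.and_true, Bool.and_false, Bool.not_true]
        have hlast : (x :: (rs ++ [a])).getLast? = some a := by
          rw [← List.cons_append]; exact List.getLast?_concat
        have hseed : (iv, pt, sd, pvRc3 (x :: rs), a, no, ocs, hvs, true)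
            = (iv, pt, sd, pvRc3 (x :: (rs ++ [a])), pvRc10 (x :: (rs ++ [a])), no, ocs, hvs,
               !((x :: (rs ++ [a])).isEmpty)) := by
          simp [pvRc3, pvRc10, List.getLastD]
          try omega
        rw [hseed, ih iv pt sd no ocs hvs (x :: (rs ++ [a]))]
        simp [pvUpd_cons, pvIsCat, hc, List.append_assoc]
    by_cases h5 : PySem.Str.isIn "_NO" a = true
    · have hc : pvCategory a = some "NO" := by
        simp only [pvCategory, pvRules, pvCatGo]; rw [if_neg h1, if_neg h2, if_neg h3, if_neg h4, if_pos h5]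
      simp only [List.foldl_cons, pvStepA, Bool.false_eq_true, if_false, h1, h2, h3, h4, h5, if_true, Bool.false_and]
      rw [ih iv pt sd a ocs hvs rcs]
      simp [pvUpd_cons, pvIsCat, hc]
    by_cases h6 : PySem.Str.isIn "OPEN_CHANNEL_SEARCH" a = true
    · have hc : pvCategory a = some "OCS" := by
        simp only [pvCategory, pvRules, pvCatGo]; rw [if_neg h1, if_neg h2, if_neg h3, if_neg h4, if_neg h5, if_pos h6]
      simp only [List.foldl_cons, pvStepA, Bool.false_eq_true, if_false, h1, h2, h3, h4, h5, h6, if_true, Bool.false_and]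
      rw [ih iv pt sd no a hvs rcs]
      simp [pvUpd_cons, pvIsCat, hc]
    by_cases h7 : PySem.Str.isIn "HVSTABILITY" a = true
    · have hc : pvCategory a = some "HVS" := by
        simp only [pvCategory, pvRules, pvCatGo]; rw [if_neg h1, if_neg h2, if_neg h3, if_neg h4, if_neg h5, if_neg h6, if_pos h7]
      simp only [List.foldl_cons, pvStepA, Bool.false_eq_true, if_false, h1, h2, h3, h4, h5, h6, h7, if_true, Bool.false_and]
      rw [ih iv pt sd no ocs a rcs]
      simp [pvUpd_cons, pvIsCat, hc]
    have hc : pvCategory a = none := by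
      simp only [pvCategory, pvRules, pvCatGo]; rw [if_neg h1, if_neg h2, if_neg h3, if_neg h4, if_neg h5, if_neg h6, if_neg h7]
    simp only [List.foldl_cons, pvStepA, Bool.false_eq_true, if_false, h1, h2, h3, h4, h5, h6, h7, Bool.false_and]
    rw [ih iv pt sd no ocs hvs rcs]
    simp [pvUpd_cons, pvIsCat, hc]

lemma pvRow_eq (tl : List String) :
    (match tl.foldl pvStepA ("", "", "", "", "", "", "", "", false) with
     | (iv, pt, sd, rc3, rc10, no, ocs, hvs, _) => [iv, pt, sd, rc3, rc10, no, ocs, hvs]) = pvRow tl := by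
  have h := pvMain tl "" "" "" "" "" "" []
  simp only [show pvRc3 ([] : List String) = "" from rfl, show pvRc10 ([] : List String) = "" from rfl,
    show (!([] : List String).isEmpty) = false from rfl, List.nil_append] at h
  rw [h]
  simp [pvRow, pvLastOf, pvUpd, pvIsCat_def, pvRc3, pvRc10]

-- ===== VERDICT (by name: the statement is the Claim_ definition above) =====
theorem format_tests_spec : Claim_equal_format_tests := by
  intro all_tests _
  unfold Spec_format_tests format_tests format_tests_alt
  rw [PySem.List.foldl_append_singleton_eq_map]
  exact List.map_congr_left (fun tl _ => pvRow_eq tl)
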